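-- pv_equiv track=rewrite | github.com/fdamken/advent-of-code | 2020/07/task1.py | get_bags_containing
-- ===== SOURCE A (Python) =====
-- def get_bags_containing(rules, base_bag_color):
--     visited = set()
--     todo = {base_bag_color}
--     while len(todo) > 0:
--         current_bag_color = todo.pop()
--         visited.add(current_bag_color)
--         for bag_color, contains_bags in rules:
--             if any([x[1] == current_bag_color for x in contains_bags]):
--                 if bag_color not in visited:
--                     todo.add(bag_color)
--     return visited - {base_bag_color}
-- ===== SOURCE B (Python) =====
-- def get_bags_containing(rules, base_bag_color):
--     # Precompute reverse adjacency: child color -> parent bag colors (in rules order),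
--     # then a single BFS from the base color; no rescanning of the rule list per step.
--     contained_in = {}
--     for bag_color, contains_bags in rules:
--         for child_color in dict.fromkeys(x[1] for x in contains_bags):
--             contained_in.setdefault(child_color, []).append(bag_color)
--     visited = []
--     todo = [base_bag_color]
--     while todo:
--         current = todo.pop(0)
--         visited.append(current)
--         for parent in contained_in.get(current, []):
--             if parent not in visited and parent not in todo:
--                 todo.append(parent)
--     return set(visited) - {base_bag_color}
-- ===== Notes on version B (the rewrite author's own statement) =====
-- stated objective: alternative
-- what changed: B builds a reverse-adjacency map (child color -> parent bags) in one pass over the rules and then runs a single BFS queue from the base color, instead of A's rescanning the entire rule list on every worklist step; on the degenerate timing inputs (one reachable color) the costs coincide, so no speed is claimed.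
import Mathlib
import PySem

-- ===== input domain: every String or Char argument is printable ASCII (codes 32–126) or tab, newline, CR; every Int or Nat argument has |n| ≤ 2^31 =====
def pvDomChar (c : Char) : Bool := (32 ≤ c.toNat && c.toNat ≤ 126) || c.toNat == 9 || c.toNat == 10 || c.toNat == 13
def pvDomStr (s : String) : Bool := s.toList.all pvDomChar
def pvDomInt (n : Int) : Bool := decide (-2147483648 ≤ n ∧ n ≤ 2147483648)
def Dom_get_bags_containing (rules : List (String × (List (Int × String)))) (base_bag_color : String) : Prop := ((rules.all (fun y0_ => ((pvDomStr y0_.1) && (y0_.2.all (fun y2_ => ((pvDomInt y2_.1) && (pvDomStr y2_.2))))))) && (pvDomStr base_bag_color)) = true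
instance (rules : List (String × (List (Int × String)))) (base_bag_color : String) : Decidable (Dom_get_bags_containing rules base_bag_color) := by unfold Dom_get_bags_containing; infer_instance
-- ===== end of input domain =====

-- B replaces A's full rule-list rescan per worklist step by a precomputed reverse-adjacency map plus one BFS (objective: alternative).
-- Python's set.pop() order is not modelled; the returned SET does not depend on it, and the ports pop the first element.

-- ===== PORT A =====
-- A's 'while todo' loop; the fuel (rules.length + 1) merely makes the same computation total:
-- each iteration pops a distinct color out of {base} ∪ rule keys, so it is never exhausted.
def pvLoopA (rules : List (String × (List (Int × String)))) :
    Nat → PySem.Set String → PySem.Set String → PySem.Set String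
  | 0, visited, _ => visited
  | fuel+1, visited, todo =>
    match todo with
    | [] => visited
    | current :: rest =>
      let visited' := PySem.Set.add visited current
      let todo' := rules.foldl (fun td p =>
          if p.2.any (fun x => x.2 == current) then
            (if PySem.Set.contains visited' p.1 then td else PySem.Set.add td p.1)
          else td) rest
      pvLoopA rules fuel visited' todo'

def get_bags_containing (rules : List (String × (List (Int × String)))) (base_bag_color : String) : List String :=
  PySem.Set.diff (pvLoopA rules (rules.length + 1) PySem.Set.empty (PySem.Set.ofList [base_bag_color]))
    (PySem.Set.ofList [base_bag_color])

-- ===== PORT B =====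
-- contained_in: child color -> parent bag colors, built once over the rules
def pvRev (rules : List (String × (List (Int × String)))) : PySem.Dict String (List String) :=
  rules.foldl (fun d p =>
    (PySem.List.dedup (p.2.map (fun x => x.2))).foldl
      (fun d c => d.modify c [] (fun l => l ++ [p.1])) d) PySem.Dict.empty

-- B's BFS queue (same totality fuel as A's loop)
def pvLoopB (rev : PySem.Dict String (List String)) :
    Nat → List String → List String → List String
  | 0, visited, _ => visited
  | fuel+1, visited, todo =>
    match todo with
    | [] => visited
    | current :: rest =>
      let visited' := visited ++ [current]
      let todo' := (rev.getD current []).foldl (fun td parent =>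
          if !(List.contains visited' parent) && !(List.contains td parent) then td ++ [parent] else td) rest
      pvLoopB rev fuel visited' todo'

def get_bags_containing_alt (rules : List (String × (List (Int × String)))) (base_bag_color : String) : List String :=
  PySem.Set.diff (PySem.Set.ofList (pvLoopB (pvRev rules) (rules.length + 1) [] [base_bag_color]))
    (PySem.Set.ofList [base_bag_color])

-- ===== PRECONDITION & SPEC =====
def Spec_get_bags_containing (rules : List (String × (List (Int × String)))) (base_bag_color : String) (out : List String) : Prop := out = get_bags_containing_alt rules base_bag_color
instance (rules : List (String × (List (Int × String)))) (base_bag_color : String) (out : List String) : Decidable (Spec_get_bags_containing rules base_bag_color out) := by unfold Spec_get_bags_containing; infer_instance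

-- ===== CLAIM (what is proved, stated in full; the proofs are below) =====
def Claim_equal_get_bags_containing : Prop := ∀ (rules : List (String × (List (Int × String)))) (base_bag_color : String), Dom_get_bags_containing rules base_bag_color → Spec_get_bags_containing rules base_bag_color (get_bags_containing rules base_bag_color)

-- ===== LEMMAS AND PROOFS =====

-- the reverse-adjacency map of B looked up at c is exactly A's inner scan of the rules
theorem pvRev_getD_aux (l : List (String × (List (Int × String)))) (d : PySem.Dict String (List String)) (c : String) :
    (l.foldl (fun d p =>
      (PySem.List.dedup (p.2.map (fun x => x.2))).foldl
        (fun d cc => d.modify cc [] (fun s => s ++ [p.1])) d) d).getD c [] =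
    d.getD c [] ++ (l.filter (fun p => p.2.any (fun x => x.2 == c))).map (fun p => p.1) := by
  induction l generalizing d with
  | nil => simp
  | cons p t ih =>
    simp only [List.foldl_cons, ih]
    have hstep : ((PySem.List.dedup (p.2.map (fun x => x.2))).foldl
        (fun d cc => d.modify cc [] (fun s => s ++ [p.1])) d).getD c []
        = d.getD c [] ++ (if p.2.any (fun x => x.2 == c) then [p.1] else []) := by
      have hmap : (PySem.List.dedup (p.2.map (fun x => x.2))).foldl
          (fun d cc => d.modify cc [] (fun s => s ++ [p.1])) d
          = ((PySem.List.dedup (p.2.map (fun x => x.2))).map (fun cc => (cc, p.1))).foldl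
              (fun d q => d.modify q.1 [] (fun s => s ++ [q.2])) d := by
        rw [List.foldl_map]
      rw [hmap, PySem.Dict.getD_foldl_modify_append]
      congr 1
      rw [List.filter_map]
      by_cases hc : p.2.any (fun x => x.2 == c)
      · have hmem : c ∈ PySem.List.dedup (p.2.map (fun x => x.2)) := by
          rw [PySem.List.mem_dedup]
          simp only [List.any_eq_true, beq_iff_eq] at hc
          obtain ⟨x, hx, he⟩ := hc
          exact List.mem_map.2 ⟨x, hx, he⟩
        have hcount : (PySem.List.dedup (p.2.map (fun x => x.2))).count c = 1 :=
          List.count_eq_one_of_mem (PySem.List.nodup_dedup _) hmem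
        simp only [hc, if_true]
        have : (PySem.List.dedup (p.2.map (fun x => x.2))).filter
            ((fun q => q.1 == c) ∘ (fun cc => (cc, p.1))) =
            (PySem.List.dedup (p.2.map (fun x => x.2))).filter (fun cc => cc == c) := rfl
        rw [this, List.filter_beq, hcount]
        simp
      · have hmem : c ∉ PySem.List.dedup (p.2.map (fun x => x.2)) := by
          rw [PySem.List.mem_dedup]
          simp only [List.any_eq_true, beq_iff_eq] at hc
          intro hm
          obtain ⟨x, hx, he⟩ := List.mem_map.1 hm
          exact hc ⟨x, hx, he⟩
        have hcount : (PySem.List.dedup (p.2.map (fun x => x.2))).count c = 0 :=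
          List.count_eq_zero.2 hmem
        simp only [hc]
        have : (PySem.List.dedup (p.2.map (fun x => x.2))).filter
            ((fun q => q.1 == c) ∘ (fun cc => (cc, p.1))) =
            (PySem.List.dedup (p.2.map (fun x => x.2))).filter (fun cc => cc == c) := rfl
        rw [this, List.filter_beq, hcount]
        simp
    rw [hstep]
    by_cases hc : p.2.any (fun x => x.2 == c) <;> simp [hc]

theorem pvRev_getD (rules : List (String × (List (Int × String)))) (c : String) :
    (pvRev rules).getD c [] =
      (rules.filter (fun p => p.2.any (fun x => x.2 == c))).map (fun p => p.1) := by
  unfold pvRev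
  rw [pvRev_getD_aux]
  simp [PySem.Dict.getD_empty]

-- one step of the worklist produces the same queue in both programs
theorem pvStep_eq (rules : List (String × (List (Int × String)))) (current : String)
    (visited' rest : List String) :
    rules.foldl (fun td p =>
        if p.2.any (fun x => x.2 == current) then
          (if PySem.Set.contains visited' p.1 then td else PySem.Set.add td p.1)
        else td) rest
    = ((pvRev rules).getD current []).foldl (fun td parent =>
        if !(List.contains visited' parent) && !(List.contains td parent) then td ++ [parent] else td) rest := by
  rw [pvRev_getD, List.foldl_map,
    PySem.List.foldl_if_eq_foldl_filter (fun p => p.2.any (fun x => x.2 == current))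
      (fun td (p : String × (List (Int × String))) => if PySem.Set.contains visited' p.1 then td else PySem.Set.add td p.1)]
  apply PySem.List.foldl_congr_mem
  intro td p _
  simp only [PySem.Set.add, PySem.Set.contains, List.contains_eq_mem]
  by_cases h1 : p.1 ∈ visited' <;> by_cases h2 : p.1 ∈ td <;> simp [h1, h2]

-- the guarded-append fold keeps the queue duplicate-free and adds only unvisited colors
theorem pvStep_nodup (v : List String) (l : List String) (td : List String) (h : td.Nodup) :
    (l.foldl (fun td b => if !(List.contains v b) && !(List.contains td b) then td ++ [b] else td) td).Nodup := by
  induction l generalizing td with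
  | nil => simpa using h
  | cons b t ih =>
    simp only [List.foldl_cons]
    split
    · apply ih
      rename_i hb
      simp only [Bool.and_eq_true, Bool.not_eq_true'] at hb
      have hbtd : b ∉ td := by simpa [List.contains_eq_mem] using hb.2
      simp only [List.nodup_append, h, true_and]
      refine ⟨by simp, ?_⟩
      intro a ha c hc hab
      simp only [List.mem_singleton] at hc
      subst hc; subst hab
      exact hbtd ha
    · exact ih td h

theorem pvStep_mem (v : List String) (l : List String) (td : List String) (x : String)
    (hx : x ∈ l.foldl (fun td b => if !(List.contains v b) && !(List.contains td b) then td ++ [b] else td) td) :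
    x ∈ td ∨ x ∉ v := by
  induction l generalizing td with
  | nil => exact Or.inl (by simpa using hx)
  | cons b t ih =>
    simp only [List.foldl_cons] at hx
    rcases ih _ hx with h | h
    · by_cases hc : (!(List.contains v b) && !(List.contains td b)) = true
      · rw [if_pos hc] at h
        rcases List.mem_append.1 h with h' | h'
        · exact Or.inl h'
        · simp only [List.mem_singleton] at h'
          subst h'
          simp only [Bool.and_eq_true, Bool.not_eq_true'] at hc
          exact Or.inr (by simpa [List.contains_eq_mem] using hc.1)
      · rw [if_neg hc] at h
        exact Or.inl h
    · exact Or.inr h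

theorem pvLoop_eq (rules : List (String × (List (Int × String)))) :
    ∀ (fuel : Nat) (visited todo : List String), visited.Nodup → todo.Nodup →
      (∀ x ∈ todo, x ∉ visited) →
      pvLoopA rules fuel visited todo = pvLoopB (pvRev rules) fuel visited todo ∧
        (pvLoopB (pvRev rules) fuel visited todo).Nodup := by
  intro fuel
  induction fuel with
  | zero => intro visited todo hv _ _; exact ⟨rfl, hv⟩
  | succ fuel ih =>
    intro visited todo hv ht hvt
    match todo with
    | [] => exact ⟨rfl, hv⟩
    | current :: rest =>
      simp only [pvLoopA, pvLoopB]
      have hcv : current ∉ visited := hvt current (by simp)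
      have hadd : PySem.Set.add visited current = visited ++ [current] := by
        simp [PySem.Set.add, PySem.Set.contains, List.contains_eq_mem, hcv]
      have hrest : rest.Nodup := (List.nodup_cons.1 ht).2
      have hcrest : current ∉ rest := (List.nodup_cons.1 ht).1
      have hv' : (visited ++ [current]).Nodup := by
        simp only [List.nodup_append, hv, true_and]
        refine ⟨by simp, ?_⟩
        intro a ha c hc hac
        simp only [List.mem_singleton] at hc
        subst hc; subst hac
        exact hcv ha
      rw [hadd, pvStep_eq rules current (visited ++ [current]) rest]
      set todo' := ((pvRev rules).getD current []).foldl (fun td parent =>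
          if !(List.contains (visited ++ [current]) parent) && !(List.contains td parent) then td ++ [parent] else td) rest with htd'
      have ht' : todo'.Nodup := pvStep_nodup _ _ _ hrest
      have hvt' : ∀ x ∈ todo', x ∉ visited ++ [current] := by
        intro x hx
        rcases pvStep_mem _ _ _ _ hx with h | h
        · have hxv : x ∉ visited := hvt x (List.mem_cons_of_mem _ h)
          have hxc : x ≠ current := fun e => hcrest (e ▸ h)
          simp [hxv, hxc]
        · exact h
      exact ih (visited ++ [current]) todo' hv' ht' hvt'

-- ===== VERDICT (by name: the statement is the Claim_ definition above) =====
theorem get_bags_containing_spec : Claim_equal_get_bags_containing := by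
  intro rules base _
  unfold Spec_get_bags_containing get_bags_containing get_bags_containing_alt
  have h0 : PySem.Set.ofList [base] = [base] := by
    simp [PySem.Set.ofList_eq_self_of_nodup]
  have h := pvLoop_eq rules (rules.length + 1) [] [base] (by simp) (by simp) (by simp)
  rw [h0]
  rw [show (PySem.Set.empty : PySem.Set String) = ([] : List String) from rfl, h.1]
  congr 1
  exact (PySem.Set.ofList_eq_self_of_nodup _ h.2).symm
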